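-- pv_equiv track=rewrite | github.com/daedalus/libciphers | src/libciphers/__init__.py | rail_fence_dec
-- ===== SOURCE A (Python) =====
-- def rail_fence_dec(ct, rails):
--     """Rail fence transposition decryption"""
--     if rails < 2:
--         return ct
--     fence = [[] for _ in range(rails)]
--     direction, row = 1, 0
--     for c in ct:
--         fence[row].append(c)
--         row += direction
--         if row == 0 or row == rails - 1:
--             direction *= -1
--     return "".join(c for line in fence for c in line)
-- ===== SOURCE B (Python) =====
-- def rail_fence_dec(ct, rails):
--     """Rail fence transposition decryption (closed-form rows + stable sort)"""
--     if rails < 2: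
--         return ct
--     cycle = 2 * (rails - 1)
--
--     def row_of(i):
--         p = i % cycle
--         return p if p < rails else cycle - p
--
--     order = sorted(range(len(ct)), key=row_of)
--     return "".join(ct[i] for i in order)
-- ===== Notes on version B (the rewrite author's own statement) =====
-- stated objective: alternative
-- what changed: Replaces the mutable per-rail buckets driven by a direction-toggle state machine with a closed-form triangle-wave row formula (p = i % (2*(rails-1)); row = p if p < rails else cycle - p) and a stable sort of the character indices by row.
import Mathlib
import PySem

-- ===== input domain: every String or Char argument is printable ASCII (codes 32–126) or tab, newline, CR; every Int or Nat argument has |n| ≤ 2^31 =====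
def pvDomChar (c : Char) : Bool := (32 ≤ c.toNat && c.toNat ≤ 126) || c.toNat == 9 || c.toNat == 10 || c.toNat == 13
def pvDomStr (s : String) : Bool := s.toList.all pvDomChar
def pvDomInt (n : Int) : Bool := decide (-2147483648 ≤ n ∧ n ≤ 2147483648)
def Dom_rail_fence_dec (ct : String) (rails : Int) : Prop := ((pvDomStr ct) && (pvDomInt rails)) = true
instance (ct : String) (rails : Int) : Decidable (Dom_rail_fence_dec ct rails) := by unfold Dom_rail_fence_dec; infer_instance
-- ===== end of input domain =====

-- B replaces A's mutable per-rail buckets with a direction toggle by a closed-form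
-- triangle-wave row formula and a stable sort of the indices by row (alternative decomposition).

-- ===== PORT A =====
-- Loop state: (fence, direction, row); when rails ≥ 2 the row index always stays in
-- [0, rails-1], so fence.set row.toNat / getD is exact for Python's fence[row].append(c).
def rail_fence_dec (ct : String) (rails : Int) : String :=
  if rails < 2 then ct
  else
    let fence : List (List Char) := (PySem.List.pyRange 0 rails 1).map (fun _ => ([] : List Char))
    let st := ct.toList.foldl
      (fun (s : List (List Char) × Int × Int) c =>
        let fence := s.1
        let direction := s.2.1
        let row := s.2.2
        let fence := fence.set row.toNat (fence.getD row.toNat [] ++ [c])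
        let row := row + direction
        let direction := if row = 0 ∨ row = rails - 1 then -direction else direction
        (fence, direction, row))
      (fence, 1, 0)
    String.mk st.1.flatten

-- ===== PORT B =====
-- closed-form row of index i in the zig-zag: p = i % cycle; p if p < rails else cycle - p
def rfdRow (cycle : Int) (rails : Int) (i : Int) : Int :=
  let p := PySem.Int.mod i cycle
  if p < rails then p else cycle - p

def rail_fence_dec_alt (ct : String) (rails : Int) : String :=
  if rails < 2 then ct
  else
    let cycle := 2 * (rails - 1)
    let order := PySem.List.sorted (PySem.List.pyRange 0 (PySem.Str.len ct) 1)
      (fun i => rfdRow cycle rails i)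
    String.mk (order.filterMap (fun i => PySem.List.pyGet? ct.toList i))

-- ===== PRECONDITION & SPEC =====
def Spec_rail_fence_dec (ct : String) (rails : Int) (out : String) : Prop := out = rail_fence_dec_alt ct rails
instance (ct : String) (rails : Int) (out : String) : Decidable (Spec_rail_fence_dec ct rails out) := by unfold Spec_rail_fence_dec; infer_instance

-- ===== CLAIM (what is proved, stated in full; the proofs are below) =====
def Claim_equal_rail_fence_dec : Prop := ∀ (ct : String) (rails : Int), Dom_rail_fence_dec ct rails → Spec_rail_fence_dec ct rails (rail_fence_dec ct rails)

-- ===== LEMMAS AND PROOFS =====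

-- closed form for A's direction variable after i characters
def rfdDir (rails : Int) (i : Int) : Int :=
  if PySem.Int.mod i (2 * (rails - 1)) < rails - 1 then 1 else -1

theorem rfd_mod_succ (c i : Int) (hc : 2 ≤ c) :
    (i + 1) % c = (if i % c + 1 = c then 0 else i % c + 1) := by
  have hlt := Int.emod_lt_of_pos i (show (0:Int) < c by omega)
  have hge := Int.emod_nonneg i (show (c:Int) ≠ 0 by omega)
  have h1 : (i+1) % c = (i % c + 1) % c := by
    have hone : (1:Int) % c = 1 := Int.emod_eq_of_lt (by omega) (by omega)
    rw [Int.add_emod, hone]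
  split_ifs with h
  · rw [h1, h, Int.emod_self]
  · rw [h1, Int.emod_eq_of_lt (by omega) (by omega)]

theorem rfd_row_bounds (rails i : Int) (h2 : 2 ≤ rails) :
    0 ≤ rfdRow (2 * (rails - 1)) rails i ∧ rfdRow (2 * (rails - 1)) rails i < rails := by
  have hc : (0:Int) < 2 * (rails - 1) := by omega
  simp only [rfdRow, PySem.Int.mod_eq_emod_of_pos hc]
  have hlt := Int.emod_lt_of_pos i (by omega : (0:Int) < 2 * (rails - 1))
  have hge := Int.emod_nonneg i (by omega : (2 * (rails - 1) : Int) ≠ 0)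
  split_ifs <;> omega

theorem rfd_step_row (rails i : Int) (h2 : 2 ≤ rails) :
    rfdRow (2 * (rails - 1)) rails (i + 1) = rfdRow (2 * (rails - 1)) rails i + rfdDir rails i := by
  have hc : (0:Int) < 2 * (rails - 1) := by omega
  simp only [rfdRow, rfdDir, PySem.Int.mod_eq_emod_of_pos hc]
  have hlt := Int.emod_lt_of_pos i (by omega : (0:Int) < 2 * (rails - 1))
  have hge := Int.emod_nonneg i (by omega : (2 * (rails - 1) : Int) ≠ 0)
  rw [rfd_mod_succ _ _ (by omega)]
  split_ifs <;> omega

theorem rfd_step_dir (rails i : Int) (h2 : 2 ≤ rails) :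
    rfdDir rails (i + 1) =
      (if rfdRow (2 * (rails - 1)) rails (i + 1) = 0 ∨ rfdRow (2 * (rails - 1)) rails (i + 1) = rails - 1
       then -(rfdDir rails i) else rfdDir rails i) := by
  have hc : (0:Int) < 2 * (rails - 1) := by omega
  simp only [rfdRow, rfdDir, PySem.Int.mod_eq_emod_of_pos hc]
  have hlt := Int.emod_lt_of_pos i (by omega : (0:Int) < 2 * (rails - 1))
  have hge := Int.emod_nonneg i (by omega : (2 * (rails - 1) : Int) ≠ 0)
  rw [rfd_mod_succ _ _ (by omega)]
  split_ifs <;> omega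

theorem rfd_map_getD (rails k : Int) (g : Int → List Char) (hk : 0 ≤ k) (hk2 : k < rails) :
    ((PySem.List.pyRange 0 rails 1).map g).getD k.toNat [] = g k := by
  have hlen : (PySem.List.pyRange 0 rails 1).length = rails.toNat := by
    simp [PySem.List.length_pyRange_one]
  have hk3 : k.toNat < ((PySem.List.pyRange 0 rails 1).map g).length := by
    simp [hlen]; omega
  rw [List.getD_eq_getElem _ _ hk3, List.getElem_map, PySem.List.getElem_pyRange_one]
  congr 1
  omega

theorem rfd_map_set (rails k : Int) (g : Int → List Char) (v : List Char) (hk : 0 ≤ k) :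
    ((PySem.List.pyRange 0 rails 1).map g).set k.toNat v
      = (PySem.List.pyRange 0 rails 1).map (fun r => if r = k then v else g r) := by
  apply List.ext_getElem
  · simp
  · intro j h1 h2
    simp only [List.getElem_set, List.getElem_map, PySem.List.getElem_pyRange_one]
    split_ifs with hc1 hc2 hc2 <;> first | rfl | (exfalso; omega)

-- loop invariant: after folding cs starting at global index i with fence contents g,
-- the fence holds, per rail r, g r followed by the characters of cs whose closed-form row is r
theorem rfd_fold_inv (rails : Int) (h2 : 2 ≤ rails) :
    ∀ (cs : List Char) (i : Int), 0 ≤ i → ∀ (g : Int → List Char),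
      cs.foldl
        (fun (s : List (List Char) × Int × Int) c =>
          let fence := s.1
          let direction := s.2.1
          let row := s.2.2
          let fence := fence.set row.toNat (fence.getD row.toNat [] ++ [c])
          let row := row + direction
          let direction := if row = 0 ∨ row = rails - 1 then -direction else direction
          (fence, direction, row))
        ((PySem.List.pyRange 0 rails 1).map g, rfdDir rails i, rfdRow (2 * (rails - 1)) rails i)
      = ((PySem.List.pyRange 0 rails 1).map (fun r =>
            g r ++ (PySem.List.enumerate cs i).filterMap
              (fun p => if rfdRow (2 * (rails - 1)) rails p.1 = r then some p.2 else none)),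
         rfdDir rails (i + cs.length), rfdRow (2 * (rails - 1)) rails (i + cs.length)) := by
  intro cs
  induction cs with
  | nil => intro i hi g; simp [PySem.List.enumerate_nil]
  | cons c cs ih =>
    intro i hi g
    rw [List.foldl_cons]
    have hb := rfd_row_bounds rails i h2
    simp only []
    rw [rfd_map_getD rails _ g hb.1 hb.2, rfd_map_set rails _ g _ hb.1,
        ← rfd_step_row rails i h2, ← rfd_step_dir rails i h2]
    rw [ih (i+1) (by omega) (fun r => if r = rfdRow (2 * (rails - 1)) rails i then g (rfdRow (2 * (rails - 1)) rails i) ++ [c] else g r)]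
    refine Prod.ext ?_ (Prod.ext ?_ ?_)
    · simp only []
      apply List.map_congr_left
      intro r hr
      rw [PySem.List.enumerate_cons]
      simp only [List.filterMap_cons]
      by_cases hcase : rfdRow (2 * (rails - 1)) rails i = r
      · subst hcase
        simp [List.append_assoc]
      · simp [hcase, Ne.symm hcase]
    · simp only []
      congr 1
      simp only [List.length_cons]
      push_cast
      omega
    · simp only []
      congr 1
      simp only [List.length_cons]
      push_cast
      omega

theorem rfd_insertBy_skip {α : Type} (bf : α → α → Bool) (x : α) (l m : List α)
    (h : ∀ y ∈ l, bf x y = false) :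
    PySem.List.insertBy bf x (l ++ m) = l ++ PySem.List.insertBy bf x m := by
  induction l with
  | nil => simp
  | cons y ys ih =>
    simp only [List.cons_append, PySem.List.insertBy, h y (by simp)]
    simp only [Bool.false_eq_true, if_false, List.cons.injEq, true_and]
    exact ih (fun z hz => h z (by simp [hz]))

theorem rfd_insertBy_front {α : Type} (bf : α → α → Bool) (x : α) (m : List α)
    (h : ∀ y ∈ m, bf x y = true) :
    PySem.List.insertBy bf x m = x :: m := by
  cases m with
  | nil => rfl
  | cons y ys => simp [PySem.List.insertBy, h y (by simp)]

theorem rfd_insertBy_buckets (rails : Int) (x : Int) (g : Int → List Int)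
    (hg : ∀ r y, y ∈ g r → rfdRow (2 * (rails - 1)) rails y = r) :
    ∀ (n : Nat) (a : Int), a ≤ rfdRow (2 * (rails - 1)) rails x →
      rfdRow (2 * (rails - 1)) rails x < a + n →
      PySem.List.insertBy
          (fun p q => decide (rfdRow (2 * (rails - 1)) rails p < rfdRow (2 * (rails - 1)) rails q))
          x ((PySem.List.pyRange a (a + n) 1).flatMap g)
        = (PySem.List.pyRange a (a + n) 1).flatMap
            (fun r => g r ++ if r = rfdRow (2 * (rails - 1)) rails x then [x] else []) := by
  intro n
  induction n with
  | zero => intro a ha hb; exfalso; omega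
  | succ n ih =>
    intro a ha hb
    rw [PySem.List.pyRange_one_cons (by omega : a < a + (n+1:Nat))]
    simp only [List.flatMap_cons]
    by_cases hc : a = rfdRow (2 * (rails - 1)) rails x
    · rw [rfd_insertBy_skip _ _ _ _ (fun y hy => by
        have := hg a y hy
        simp [← hc, this])]
      rw [rfd_insertBy_front _ _ _ (fun y hy => by
        obtain ⟨r, hr, hyr⟩ := List.mem_flatMap.mp hy
        have hkr := hg r y hyr
        have hrmem := (PySem.List.mem_pyRange_one).mp hr
        simp only [decide_eq_true_eq]
        omega)]
      have hcong : List.flatMap (fun r => g r ++ if r = rfdRow (2 * (rails - 1)) rails x then [x] else [])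
          (PySem.List.pyRange (a + 1) (a + ((n:Int) + 1)) 1)
          = List.flatMap g (PySem.List.pyRange (a + 1) (a + ((n:Int) + 1)) 1) :=
        List.flatMap_congr (fun r hr => by
          have hrmem := (PySem.List.mem_pyRange_one).mp hr
          have hne : ¬ (r = rfdRow (2 * (rails - 1)) rails x) := by omega
          simp [hne])
      push_cast
      rw [hcong, if_pos hc]
      simp
    · have hskip : ∀ y ∈ g a, (fun p q => decide (rfdRow (2 * (rails - 1)) rails p < rfdRow (2 * (rails - 1)) rails q)) x y = false := by
        intro y hy
        have := hg a y hy
        simp only [decide_eq_false_iff_not]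
        omega
      rw [rfd_insertBy_skip _ _ _ _ hskip]
      have hstep : a + 1 + (n : Int) = a + (n + 1 : Nat) := by push_cast; ring
      have := ih (a + 1) (by omega) (by omega)
      rw [hstep] at this
      rw [this]
      simp [hc]

theorem rfd_sorted_buckets (rails : Int) (h2 : 2 ≤ rails) (xs : List Int)
    (hxs : ∀ i ∈ xs, 0 ≤ i) :
    PySem.List.sorted xs (fun i => rfdRow (2 * (rails - 1)) rails i)
      = (PySem.List.pyRange 0 rails 1).flatMap
          (fun r => xs.filter (fun i => rfdRow (2 * (rails - 1)) rails i = r)) := by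
  rw [PySem.List.sorted_eq_foldl_insertBy]
  induction xs using List.reverseRecOn with
  | nil => simp
  | append_singleton xs x ih =>
    rw [List.foldl_append, List.foldl_cons, List.foldl_nil]
    rw [ih (fun i hi => hxs i (by simp [hi]))]
    have hbx := rfd_row_bounds rails x h2
    have h0 : (0:Int) ≤ rfdRow (2 * (rails - 1)) rails x := hbx.1
    have := rfd_insertBy_buckets rails x
      (fun r => xs.filter (fun i => rfdRow (2 * (rails - 1)) rails i = r))
      (fun r y hy => by simpa using (List.of_mem_filter hy))
      rails.toNat 0 h0 (by omega)
    rw [show ((0:Int) + (rails.toNat : Int)) = rails by omega] at this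
    rw [this]
    exact List.flatMap_congr (fun r hr => by
      rw [List.filter_append]
      congr 1
      by_cases hc : rfdRow (2 * (rails - 1)) rails x = r
      · simp [hc]
      · have hne : ¬ r = rfdRow (2 * (rails - 1)) rails x := fun h => hc h.symm
        simp [hc, hne])

theorem rfd_bucket_chars (rails : Int) (cts : List Char) (r : Int) :
    (PySem.List.enumerate cts 0).filterMap
        (fun p => if rfdRow (2 * (rails - 1)) rails p.1 = r then some p.2 else none)
      = ((PySem.List.pyRange 0 (cts.length : Int) 1).filter
          (fun i => rfdRow (2 * (rails - 1)) rails i = r)).filterMap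
          (fun i => PySem.List.pyGet? cts i) := by
  rw [PySem.List.enumerate_eq_map_pyRange cts 'x', List.filterMap_map, List.filterMap_filter]
  have hlen : PySem.List.len cts = (cts.length : Int) := by simp [PySem.List.len]
  rw [hlen]
  exact List.filterMap_congr (fun j hj => by
    have hjm := (PySem.List.mem_pyRange_one).mp hj
    by_cases hc : rfdRow (2 * (rails - 1)) rails j = r
    · have hjn : j.toNat < cts.length := by omega
      simp only [Function.comp, hc, if_pos, decide_true]
      rw [PySem.List.pyGet?_eq_some_getElem cts hjm.1 hjm.2,
          PySem.List.pyGetD_eq_getElem cts 'x' hjm.1 hjm.2]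
    · simp [Function.comp, hc])

theorem rfd_main (ct : String) (rails : Int) : rail_fence_dec ct rails = rail_fence_dec_alt ct rails := by
  unfold rail_fence_dec rail_fence_dec_alt
  by_cases h : rails < 2
  · simp [h]
  · have h2 : 2 ≤ rails := by omega
    simp only [h, if_false]
    have hd0 : rfdDir rails 0 = 1 := by
      simp only [rfdDir, PySem.Int.mod_eq_emod_of_pos (show (0:Int) < 2*(rails-1) by omega)]
      rw [Int.emod_eq_of_lt (by omega) (by omega)]
      simp only [if_pos (by omega : (0:Int) < rails - 1)]
    have hr0 : rfdRow (2 * (rails - 1)) rails 0 = 0 := by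
      simp only [rfdRow, PySem.Int.mod_eq_emod_of_pos (show (0:Int) < 2*(rails-1) by omega)]
      rw [Int.emod_eq_of_lt (by omega) (by omega)]
      simp only [if_pos (by omega : (0:Int) < rails)]
    have key := rfd_fold_inv rails h2 ct.toList 0 (le_refl 0) (fun _ => ([] : List Char))
    rw [hd0, hr0] at key
    rw [key]
    simp only [List.nil_append]
    rw [PySem.Str.len_eq]
    rw [rfd_sorted_buckets rails h2 _ (fun i hi => ((PySem.List.mem_pyRange_one).mp hi).1)]
    rw [List.filterMap_flatMap]
    rw [← List.flatMap_def]
    congr 1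
    exact List.flatMap_congr (fun r hr => rfd_bucket_chars rails ct.toList r)

-- ===== VERDICT (by name: the statement is the Claim_ definition above) =====
theorem rail_fence_dec_spec : Claim_equal_rail_fence_dec := by
  intro ct rails _
  unfold Spec_rail_fence_dec
  exact rfd_main ct rails
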